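-- pv_equiv track=rewrite | github.com/tobbi007/OctoPrint-OctoPlug | octoprint_octoplug/smartplug.py | _parse_schedule
-- ===== SOURCE A (Python) =====
-- def _parse_schedule(sched):
--
--     """
--     Parse the plugs internal scheduling format string to python array
--
--     :type self: object
--     :type sched: str
--     :rtype: list
--     :param sched: scheduling string (of one day) as returned by plug
--     :return: python array with scheduling: [[[start_hh:start_mm],[end_hh:end_mm]], ... ]
--     """
--
--     sched_unpacked = [0] * 60 * 24
--     hours = []
--
--     idx_sched = 0
--
--     # first, unpack the packed schedule from the plug
--     for packed in sched:
--
--         int_packed = int(packed, 16)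
--
--         sched_unpacked[idx_sched+0] = (int_packed >> 3) & 1
--         sched_unpacked[idx_sched+1] = (int_packed >> 2) & 1
--         sched_unpacked[idx_sched+2] = (int_packed >> 1) & 1
--         sched_unpacked[idx_sched+3] = (int_packed >> 0) & 1
--
--         idx_sched += 4
--
--     idx_hours = 0
--
--     hour = 0
--     min = 0
--
--     found_range = False
--
--     # second build time array from unpacked schedule
--     for m in sched_unpacked:
--
--         if m == 1 and not found_range:
--             found_range = True
--             hours.append([[hour, min], [23, 59]])
--
--         elif m == 0 and found_range:
--             found_range = False
--             hours[idx_hours][1][0] = hour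
--             hours[idx_hours][1][1] = min
--             idx_hours += 1
--
--         min += 1
--
--         if min > 59:
--             min = 0
--             hour += 1
--
--     return hours
-- ===== SOURCE B (Python) =====
-- def _parse_schedule(sched):
--     # Unpack the hex nibbles into a per-minute bit list and pad it to a full day.
--     bits = [(int(c, 16) >> k) & 1 for c in sched for k in (3, 2, 1, 0)]
--     bits += [0] * (1440 - len(bits))
--     # A range starts where a 1 follows a 0 (or the day start), and ends just
--     # after a 1 that is followed by a 0 (or the day end): detect both edges by
--     # zipping the bit list with a shifted copy of itself, then pair them up.
--     starts = [i for i, (p, b) in enumerate(zip([0] + bits, bits)) if b and not p]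
--     ends = [i + 1 for i, (b, n) in enumerate(zip(bits, bits[1:] + [0])) if b and not n]
--     return [[[s // 60, s % 60], [23, 59] if e == 1440 else [e // 60, e % 60]]
--             for s, e in zip(starts, ends)]
-- ===== Notes on version B (the rewrite author's own statement) =====
-- stated objective: alternative
-- what changed: Replaces the minute-by-minute state machine that appends a [23,59] sentinel entry and patches it on run close with edge detection: unpack the nibbles into a padded 1440-bit day, find run starts and ends by zipping the bit list with shifted copies of itself, and emit each complete [[start],[end]] entry in one comprehension (a run touching minute 1440 keeps the [23,59] end, exactly as A leaves it).
import Mathlib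
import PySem

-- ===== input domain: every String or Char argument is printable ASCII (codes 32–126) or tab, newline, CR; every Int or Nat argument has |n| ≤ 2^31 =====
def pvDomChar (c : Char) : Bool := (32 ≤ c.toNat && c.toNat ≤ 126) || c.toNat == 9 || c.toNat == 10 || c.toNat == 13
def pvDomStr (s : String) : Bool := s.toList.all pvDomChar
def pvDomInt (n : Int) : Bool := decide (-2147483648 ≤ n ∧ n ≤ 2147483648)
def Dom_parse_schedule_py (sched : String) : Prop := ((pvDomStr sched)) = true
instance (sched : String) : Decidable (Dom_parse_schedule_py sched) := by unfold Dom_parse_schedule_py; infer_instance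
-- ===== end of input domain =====

-- B replaces A's minute-by-minute sentinel-and-patch state machine by edge detection on the
-- padded bit list (zip with shifted copies of itself, then pair the start and end edges).

-- ===== PORT A =====

-- int(c, 16) for one char: some value 0..15 for a hex digit, none = ValueError (excluded by Pre_)
def pvHexVal? (c : Char) : Option Int :=
  if '0' ≤ c ∧ c ≤ '9' then some ((c.toNat : Int) - 48)
  else if 'a' ≤ c ∧ c ≤ 'f' then some ((c.toNat : Int) - 87)
  else if 'A' ≤ c ∧ c ≤ 'F' then some ((c.toNat : Int) - 55)
  else none

structure PvStA where
  hours : List (List (List Int))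
  idxh : Nat
  hour : Int
  min : Int
  found : Bool
  deriving Repr

def pvUnpackStepA (st : List Int × Nat) (c : Char) : List Int × Nat :=
  let v := (pvHexVal? c).getD 0
  let arr := (st.1.set st.2 (PySem.Int.band (v >>> (3:Nat)) 1)).set (st.2+1) (PySem.Int.band (v >>> (2:Nat)) 1)
  let arr := (arr.set (st.2+2) (PySem.Int.band (v >>> (1:Nat)) 1)).set (st.2+3) (PySem.Int.band (v >>> (0:Nat)) 1)
  (arr, st.2 + 4)


-- one minute of A's second loop, branch for branch
def pvBuildStepA (st : PvStA) (m : Int) : PvStA :=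
  let st :=
    if m == 1 && !st.found then
      { st with hours := st.hours ++ [[[st.hour, st.min], [23, 59]]], found := true }
    else if m == 0 && st.found then
      { st with hours := st.hours.modify st.idxh (fun e => e.modify 1 (fun p => (p.set 0 st.hour).set 1 st.min)),
                idxh := st.idxh + 1, found := false }
    else st
  let st := { st with min := st.min + 1 }
  if st.min > 59 then { st with min := 0, hour := st.hour + 1 } else st


def parse_schedule_py (sched : String) : List (List (List Int)) :=
  let unpacked := sched.toList.foldl pvUnpackStepA (List.replicate (60*24) (0:Int), 0)
  (unpacked.1.foldl pvBuildStepA ⟨[], 0, 0, 0, false⟩).hours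

-- ===== PORT B =====

-- Source B's inner comprehension: the four bits of one hex char, high bit first
def pvNibbles (c : Char) : List Int :=
  [3, 2, 1, 0].map (fun k : Nat => PySem.Int.band (((pvHexVal? c).getD 0) >>> k) 1)

def parse_schedule_py_alt (sched : String) : List (List (List Int)) :=
  let bits := sched.toList.flatMap pvNibbles
  let bits := bits ++ List.replicate (1440 - bits.length) (0:Int)
  let starts := (PySem.List.enumerate (((0:Int) :: bits).zip bits)).filterMap
    (fun q => if q.2.2 ≠ 0 ∧ q.2.1 = 0 then some q.1 else none)
  let ends := (PySem.List.enumerate (bits.zip (PySem.List.slice bits (some 1) none ++ [(0:Int)]))).filterMap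
    (fun q => if q.2.1 ≠ 0 ∧ q.2.2 = 0 then some (q.1 + 1) else none)
  (starts.zip ends).map (fun se =>
    [[PySem.Int.floordiv se.1 60, PySem.Int.mod se.1 60],
     if se.2 = 1440 then [23, 59] else [PySem.Int.floordiv se.2 60, PySem.Int.mod se.2 60]])

-- ===== PRECONDITION & SPEC =====
-- Pre_ is exactly where the Python A returns: every char a hex digit (else int(c, 16)
-- raises ValueError) and at most 360 chars (else the indexed writes raise IndexError).
def Pre_parse_schedule_py (sched : String) : Prop :=
  sched.toList.all (fun c => (pvHexVal? c).isSome) = true ∧ sched.toList.length ≤ 360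
instance (sched : String) : Decidable (Pre_parse_schedule_py sched) := by
  unfold Pre_parse_schedule_py; infer_instance

def pvWitness_parse_schedule_py : String := "f0ffA"

def Spec_parse_schedule_py (sched : String) (out : List (List (List Int))) : Prop :=
  out = parse_schedule_py_alt sched
instance (sched : String) (out : List (List (List Int))) : Decidable (Spec_parse_schedule_py sched out) := by
  unfold Spec_parse_schedule_py; infer_instance

-- ===== CLAIM (what is proved, stated in full; the proofs are below) =====
def Claim_equal_parse_schedule_py : Prop :=
  ∀ (sched : String), Dom_parse_schedule_py sched → Pre_parse_schedule_py sched →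
    Spec_parse_schedule_py sched (parse_schedule_py sched)

-- ===== LEMMAS AND PROOFS =====

def pvPairs : List Int → Nat → Option Nat → List (Nat × Option Nat)
  | [], _, none => []
  | [], _, some s => [(s, none)]
  | b :: r, t, none => if b = 1 then pvPairs r (t+1) (some t) else pvPairs r (t+1) none
  | b :: r, t, some s => if b = 1 then pvPairs r (t+1) (some s) else (s, some t) :: pvPairs r (t+1) none

theorem pvBand01 (a : Int) : PySem.Int.band a 1 = 0 ∨ PySem.Int.band a 1 = 1 := by
  rw [PySem.Int.band_one]
  have h1 := PySem.Int.mod_nonneg a (b := 2) (by omega)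
  have h2 := PySem.Int.mod_lt a (b := 2) (by omega)
  omega

theorem pvBits01 : ∀ (cs : List Char) (b : Int), b ∈ cs.flatMap pvNibbles → b = 0 ∨ b = 1 := by
  intro cs b hb
  simp only [List.mem_flatMap, pvNibbles, List.mem_map] at hb
  obtain ⟨c, _, k, _, rfl⟩ := hb
  exact pvBand01 _

theorem pvFlat_len : ∀ cs : List Char, (cs.flatMap pvNibbles).length = 4 * cs.length := by
  intro cs
  induction cs with
  | nil => rfl
  | cons c cs ih => simp [pvNibbles, ih]; omega

theorem pvPairs_some_shape : ∀ (bs : List Int) (t s : Nat),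
    ∃ e r, pvPairs bs t (some s) = (s, e) :: r ∧ ∀ s', pvPairs bs t (some s') = (s', e) :: r := by
  intro bs
  induction bs with
  | nil => intro t s; exact ⟨none, [], rfl, fun s' => rfl⟩
  | cons b r ih =>
    intro t s
    by_cases hb : b = 1
    · obtain ⟨e, rs, h1, h2⟩ := ih (t+1) s
      exact ⟨e, rs, by simp [pvPairs, hb, h1], fun s' => by simp [pvPairs, hb, h2 s']⟩
    · exact ⟨some t, pvPairs r (t+1) none, by simp [pvPairs, hb], fun s' => by simp [pvPairs, hb]⟩

theorem pvPairs_snd_lt : ∀ (bs : List Int) (t : Nat) (o : Option Nat) (s e : Nat),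
    (s, some e) ∈ pvPairs bs t o → e < t + bs.length := by
  intro bs
  induction bs with
  | nil =>
    intro t o s e h
    cases o with
    | none => simp [pvPairs] at h
    | some s0 => simp [pvPairs] at h
  | cons b r ih =>
    intro t o s e h
    cases o with
    | none =>
      simp only [pvPairs] at h
      split at h
      · have := ih (t+1) (some t) s e h; simpa [Nat.add_comm, Nat.add_assoc, Nat.add_left_comm] using this
      · have := ih (t+1) none s e h; simpa [Nat.add_comm, Nat.add_assoc, Nat.add_left_comm] using this
    | some s0 =>
      simp only [pvPairs] at h
      split at h
      · have := ih (t+1) (some s0) s e h; simpa [Nat.add_comm, Nat.add_assoc, Nat.add_left_comm] using this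
      · rcases List.mem_cons.1 h with h | h
        · simp only [Prod.mk.injEq, Option.some.injEq] at h
          simp only [List.length_cons]
          omega
        · have := ih (t+1) none s e h; simpa [Nat.add_comm, Nat.add_assoc, Nat.add_left_comm] using this

def pvClose (N : Nat) (pr : Nat × Option Nat) : Nat :=
  match pr.2 with | some e => e | none => N

theorem pvStarts : ∀ (bs : List Int), (∀ b ∈ bs, b = 0 ∨ b = 1) → ∀ (t : Nat) (p : Int),
    (PySem.List.enumerate ((p :: bs).zip bs) (t : Int)).filterMap
        (fun q => if q.2.2 ≠ 0 ∧ q.2.1 = 0 then some q.1 else none)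
      = (if p = 0 then pvPairs bs t none else (pvPairs bs t (some 0)).tail).map
          (fun pr => ((pr.1 : Nat) : Int)) := by
  intro bs
  induction bs with
  | nil =>
    intro _ t p
    by_cases hp : p = 0 <;> simp [pvPairs, hp, PySem.List.enumerate]
  | cons b r ih =>
    intro h01 t p
    have hb := h01 b (List.mem_cons_self ..)
    have h01r : ∀ x ∈ r, x = 0 ∨ x = 1 := fun x hx => h01 x (List.mem_cons_of_mem _ hx)
    have hzip : (p :: b :: r).zip (b :: r) = (p, b) :: (b :: r).zip r := rfl
    have hc : (t : Int) + 1 = ((t + 1 : Nat) : Int) := by push_cast; ring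
    rw [hzip, PySem.List.enumerate_cons, List.filterMap_cons, hc, ih h01r (t+1) b]
    rcases hb with hb | hb
    · subst hb
      by_cases hp : p = 0 <;> simp [pvPairs, hp]
    · subst hb
      obtain ⟨e, rs, h1, h2⟩ := pvPairs_some_shape r (t+1) t
      by_cases hp : p = 0
      · simp only [hp, if_pos rfl]
        simp [pvPairs, h1, h2 0]
      · simp [pvPairs, hp, h2 0]

set_option maxRecDepth 4000 in
theorem pvEnds : ∀ (bs : List Int), (∀ b ∈ bs, b = 0 ∨ b = 1) → ∀ (t : Nat),
    (PySem.List.enumerate (bs.zip (bs.tail ++ [(0:Int)])) (t : Int)).filterMap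
        (fun q => if q.2.1 ≠ 0 ∧ q.2.2 = 0 then some (q.1 + 1) else none)
      = (pvPairs bs t none).map (fun pr => ((pvClose (t + bs.length) pr : Nat) : Int)) := by
  intro bs
  induction bs with
  | nil => intro _ t; simp [pvPairs, PySem.List.enumerate]
  | cons b r ih =>
    intro h01 t
    have hb := h01 b (List.mem_cons_self ..)
    have h01r : ∀ x ∈ r, x = 0 ∨ x = 1 := fun x hx => h01 x (List.mem_cons_of_mem _ hx)
    have hc : (t : Int) + 1 = ((t + 1 : Nat) : Int) := by push_cast; ring
    cases r with
    | nil =>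
      have hzip : ([b] : List Int).zip (([b] : List Int).tail ++ [(0:Int)]) = [(b, (0:Int))] := rfl
      rw [hzip]
      rcases hb with hb | hb <;> subst hb <;>
        simp [PySem.List.enumerate_cons, PySem.List.enumerate_nil, pvPairs, pvClose]
    | cons c r2 =>
      have hzip : (b :: c :: r2).zip ((b :: c :: r2).tail ++ [(0:Int)])
          = (b, c) :: ((c :: r2).zip ((c :: r2).tail ++ [(0:Int)])) := rfl
      rw [hzip, PySem.List.enumerate_cons, List.filterMap_cons, hc, ih h01r (t+1)]
      have hN : (t + 1) + (c :: r2).length = t + (b :: c :: r2).length := by simp; omega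
      rw [hN]
      have hcv := h01 c (List.mem_cons_of_mem _ (List.mem_cons_self ..))
      rcases hb with hb | hb <;> subst hb
      · simp [pvPairs]
      · rcases hcv with hcv | hcv <;> subst hcv
        · simp [pvPairs, pvClose]
        · obtain ⟨e, rs, h1, h2⟩ := pvPairs_some_shape r2 (t+2) (t+1)
          have h3 := h2 t
          have e1 : pvPairs (1 :: r2) (t+1) (some 0) = pvPairs r2 (t+2) (some 0) := by simp [pvPairs]
          have e2 : pvPairs (1 :: 1 :: r2) t none = pvPairs r2 (t+2) (some t) := by simp [pvPairs]
          have e3 : pvPairs (1 :: r2) (t+1) none = pvPairs r2 (t+2) (some (t+1)) := by simp [pvPairs]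
          rw [e2, e3, h1, h3]
          simp [pvClose]

def pvRender (pr : Nat × Option Nat) : List (List Int) :=
  [[((pr.1 / 60 : Nat) : Int), ((pr.1 % 60 : Nat) : Int)],
   match pr.2 with
   | some e => [((e / 60 : Nat) : Int), ((e % 60 : Nat) : Int)]
   | none => [23, 59]]

theorem pvStep0n (t : Nat) (H : List (List (List Int))) (i : Nat) :
    pvBuildStepA ⟨H, i, ((t/60 : Nat) : Int), ((t%60 : Nat) : Int), false⟩ 0
      = ⟨H, i, (((t+1)/60 : Nat) : Int), (((t+1)%60 : Nat) : Int), false⟩ := by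
  unfold pvBuildStepA
  show (if ((t%60 : Nat) : Int) + 1 > 59
      then ({ hours := H, idxh := i, hour := ((t/60 : Nat) : Int) + 1, min := 0, found := false } : PvStA)
      else { hours := H, idxh := i, hour := ((t/60 : Nat) : Int), min := ((t%60 : Nat) : Int) + 1, found := false }) = _
  split_ifs with h <;>
    (simp only [PvStA.mk.injEq, and_true, true_and]; exact ⟨by omega, by omega⟩)

theorem pvStep1n (t : Nat) (H : List (List (List Int))) (i : Nat) :
    pvBuildStepA ⟨H, i, ((t/60 : Nat) : Int), ((t%60 : Nat) : Int), false⟩ 1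
      = ⟨H ++ [[[((t/60 : Nat) : Int), ((t%60 : Nat) : Int)], [23, 59]]], i,
          (((t+1)/60 : Nat) : Int), (((t+1)%60 : Nat) : Int), true⟩ := by
  unfold pvBuildStepA
  show (if ((t%60 : Nat) : Int) + 1 > 59
      then ({ hours := H ++ [[[((t/60 : Nat) : Int), ((t%60 : Nat) : Int)], [23, 59]]], idxh := i,
              hour := ((t/60 : Nat) : Int) + 1, min := 0, found := true } : PvStA)
      else { hours := H ++ [[[((t/60 : Nat) : Int), ((t%60 : Nat) : Int)], [23, 59]]], idxh := i,
              hour := ((t/60 : Nat) : Int), min := ((t%60 : Nat) : Int) + 1, found := true }) = _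
  split_ifs with h <;>
    (simp only [PvStA.mk.injEq, and_true, true_and]; exact ⟨by omega, by omega⟩)

theorem pvStep1s (t : Nat) (H : List (List (List Int))) (i : Nat) :
    pvBuildStepA ⟨H, i, ((t/60 : Nat) : Int), ((t%60 : Nat) : Int), true⟩ 1
      = ⟨H, i, (((t+1)/60 : Nat) : Int), (((t+1)%60 : Nat) : Int), true⟩ := by
  unfold pvBuildStepA
  show (if ((t%60 : Nat) : Int) + 1 > 59
      then ({ hours := H, idxh := i, hour := ((t/60 : Nat) : Int) + 1, min := 0, found := true } : PvStA)
      else { hours := H, idxh := i, hour := ((t/60 : Nat) : Int), min := ((t%60 : Nat) : Int) + 1, found := true }) = _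
  split_ifs with h <;>
    (simp only [PvStA.mk.injEq, and_true, true_and]; exact ⟨by omega, by omega⟩)

theorem pvStep0s (t : Nat) (H : List (List (List Int))) (i : Nat) :
    pvBuildStepA ⟨H, i, ((t/60 : Nat) : Int), ((t%60 : Nat) : Int), true⟩ 0
      = ⟨H.modify i (fun e => e.modify 1 (fun p => (p.set 0 ((t/60 : Nat) : Int)).set 1 ((t%60 : Nat) : Int))),
          i + 1, (((t+1)/60 : Nat) : Int), (((t+1)%60 : Nat) : Int), false⟩ := by
  unfold pvBuildStepA
  show (if ((t%60 : Nat) : Int) + 1 > 59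
      then ({ hours := H.modify i (fun e => e.modify 1 (fun p => (p.set 0 ((t/60 : Nat) : Int)).set 1 ((t%60 : Nat) : Int))),
              idxh := i + 1, hour := ((t/60 : Nat) : Int) + 1, min := 0, found := false } : PvStA)
      else { hours := H.modify i (fun e => e.modify 1 (fun p => (p.set 0 ((t/60 : Nat) : Int)).set 1 ((t%60 : Nat) : Int))),
              idxh := i + 1, hour := ((t/60 : Nat) : Int), min := ((t%60 : Nat) : Int) + 1, found := false }) = _
  split_ifs with h <;>
    (simp only [PvStA.mk.injEq, and_true, true_and]; exact ⟨by omega, by omega⟩)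

theorem pvModifyApp {α : Type} (H : List α) (e : α) (f : α → α) :
    (H ++ [e]).modify H.length f = H ++ [f e] := by
  induction H with
  | nil => rfl
  | cons a H ih =>
    show a :: (H ++ [e]).modify H.length f = a :: (H ++ [f e])
    exact congrArg _ ih

theorem pvBuildA : ∀ (bs : List Int), (∀ b ∈ bs, b = 0 ∨ b = 1) → ∀ (t : Nat) (H : List (List (List Int))),
    ((bs.foldl pvBuildStepA ⟨H, H.length, ((t/60 : Nat) : Int), ((t%60 : Nat) : Int), false⟩).hours
      = H ++ (pvPairs bs t none).map pvRender)
    ∧ (∀ s : Nat,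
      (bs.foldl pvBuildStepA ⟨H ++ [[[((s/60 : Nat) : Int), ((s%60 : Nat) : Int)], [23, 59]]],
          H.length, ((t/60 : Nat) : Int), ((t%60 : Nat) : Int), true⟩).hours
        = H ++ (pvPairs bs t (some s)).map pvRender) := by
  intro bs
  induction bs with
  | nil =>
    intro _ t H
    refine ⟨by simp [pvPairs], fun s => by simp [pvPairs, pvRender]⟩
  | cons b r ih =>
    intro h01 t H
    have hb := h01 b (List.mem_cons_self ..)
    have h01r : ∀ x ∈ r, x = 0 ∨ x = 1 := fun x hx => h01 x (List.mem_cons_of_mem _ hx)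
    constructor
    · rcases hb with hb | hb <;> subst hb
      · rw [List.foldl_cons, pvStep0n, (ih h01r (t+1) H).1]
        simp [pvPairs]
      · rw [List.foldl_cons, pvStep1n]
        have := (ih h01r (t+1) H).2 t
        rw [this]
        simp [pvPairs]
    · intro s
      rcases hb with hb | hb <;> subst hb
      · rw [List.foldl_cons, pvStep0s, pvModifyApp]
        have hmod : ([[((s/60 : Nat) : Int), ((s%60 : Nat) : Int)], [23, 59]] : List (List Int)).modify 1
              (fun p => (p.set 0 ((t/60 : Nat) : Int)).set 1 ((t%60 : Nat) : Int))
            = pvRender (s, some t) := by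
          simp [List.modify, pvRender]
        rw [hmod]
        have hlen : (H ++ [pvRender (s, some t)]).length = H.length + 1 := by simp
        rw [show H.length + 1 = (H ++ [pvRender (s, some t)]).length from hlen.symm,
          (ih h01r (t+1) (H ++ [pvRender (s, some t)])).1]
        simp [pvPairs]
      · rw [List.foldl_cons, pvStep1s, (ih h01r (t+1) H).2 s]
        simp [pvPairs]

theorem pvSetApp (pre : List Int) (m : Nat) (v : Int) :
    (pre ++ List.replicate (m+1) (0:Int)).set pre.length v = (pre ++ [v]) ++ List.replicate m 0 := by
  rw [List.set_append]
  simp [List.replicate_succ]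

theorem pvUnpackA : ∀ (cs : List Char) (pre : List Int), 4 * cs.length + pre.length ≤ 1440 →
    (cs.foldl pvUnpackStepA (pre ++ List.replicate (1440 - pre.length) (0:Int), pre.length)).1
      = pre ++ cs.flatMap pvNibbles ++ List.replicate (1440 - pre.length - 4 * cs.length) (0:Int) := by
  intro cs
  induction cs with
  | nil => intro pre h; simp
  | cons c cs ih =>
    intro pre h
    simp only [List.length_cons] at h
    rw [List.foldl_cons]
    set v := (pvHexVal? c).getD 0 with hv
    have hstep : pvUnpackStepA (pre ++ List.replicate (1440 - pre.length) (0:Int), pre.length) c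
        = ((pre ++ pvNibbles c) ++ List.replicate (1440 - (pre ++ pvNibbles c).length) (0:Int),
            (pre ++ pvNibbles c).length) := by
      unfold pvUnpackStepA
      have e4 : 1440 - pre.length = (1440 - pre.length - 4) + 4 := by omega
      rw [e4]
      show (((((pre ++ List.replicate (1440 - pre.length - 4 + 4) (0:Int)).set pre.length
            (PySem.Int.band (v >>> (3:Nat)) 1)).set (pre.length+1) (PySem.Int.band (v >>> (2:Nat)) 1)).set
            (pre.length+2) (PySem.Int.band (v >>> (1:Nat)) 1)).set (pre.length+3) (PySem.Int.band (v >>> (0:Nat)) 1),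
            pre.length + 4) = _
      rw [show 1440 - pre.length - 4 + 4 = (1440 - pre.length - 4 + 3) + 1 from by omega, pvSetApp]
      rw [show pre.length + 1 = (pre ++ [PySem.Int.band (v >>> (3:Nat)) 1]).length from by simp,
        show 1440 - pre.length - 4 + 3 = (1440 - pre.length - 4 + 2) + 1 from by omega, pvSetApp]
      rw [show pre.length + 2
            = ((pre ++ [PySem.Int.band (v >>> (3:Nat)) 1]) ++ [PySem.Int.band (v >>> (2:Nat)) 1]).length from by simp,
        show 1440 - pre.length - 4 + 2 = (1440 - pre.length - 4 + 1) + 1 from by omega, pvSetApp]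
      rw [show pre.length + 3
            = (((pre ++ [PySem.Int.band (v >>> (3:Nat)) 1]) ++ [PySem.Int.band (v >>> (2:Nat)) 1])
                ++ [PySem.Int.band (v >>> (1:Nat)) 1]).length from by simp,
        show 1440 - pre.length - 4 + 1 = (1440 - pre.length - 4) + 1 from by omega, pvSetApp]
      have hnib : pvNibbles c = [PySem.Int.band (v >>> (3:Nat)) 1, PySem.Int.band (v >>> (2:Nat)) 1,
          PySem.Int.band (v >>> (1:Nat)) 1, PySem.Int.band (v >>> (0:Nat)) 1] := by
        rfl
      simp only [Prod.mk.injEq]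
      refine ⟨?_, ?_⟩
      · rw [hnib]; simp only [List.append_assoc, List.cons_append, List.nil_append,
          List.singleton_append]
        congr 1
        simp
        omega
      · rw [hnib]; simp
    rw [hstep, ih]
    · have hl : (pre ++ pvNibbles c).length = pre.length + 4 := by simp [pvNibbles]
      have hcnt : 1440 - (pre.length + 4) - 4 * cs.length = 1440 - pre.length - 4 * (cs.length + 1) := by
        omega
      simp only [List.flatMap_cons, List.append_assoc, hl, hcnt, List.length_cons]
    · have h4 : (pre ++ pvNibbles c).length = pre.length + 4 := by simp [pvNibbles]
      simp only [h4]
      omega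

theorem parse_schedule_py_main (sched : String) (hpre : Pre_parse_schedule_py sched) :
    parse_schedule_py sched = parse_schedule_py_alt sched := by
  obtain ⟨hhex, hlen⟩ := hpre
  have hflatlen := pvFlat_len sched.toList
  have hlen4 : 4 * sched.toList.length ≤ 1440 := by omega
  have hun := pvUnpackA sched.toList [] (by simpa using hlen4)
  simp only [List.length_nil, Nat.sub_zero, List.nil_append] at hun
  -- the common bit list
  have hB01 : ∀ b ∈ sched.toList.flatMap pvNibbles
      ++ List.replicate (1440 - 4 * sched.toList.length) (0:Int), b = 0 ∨ b = 1 := by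
    intro b hb
    rcases List.mem_append.1 hb with hb | hb
    · exact pvBits01 _ _ hb
    · left; exact List.eq_of_mem_replicate hb
  have hBlen : (sched.toList.flatMap pvNibbles
      ++ List.replicate (1440 - 4 * sched.toList.length) (0:Int)).length = 1440 := by
    rw [List.length_append, hflatlen, List.length_replicate]
    omega
  -- A's side
  have hA : parse_schedule_py sched
      = ((sched.toList.flatMap pvNibbles
          ++ List.replicate (1440 - 4 * sched.toList.length) (0:Int)).foldl pvBuildStepA
            ⟨[], 0, 0, 0, false⟩).hours := by
    simp only [parse_schedule_py]
    rw [show (List.replicate (60*24) (0:Int), 0) = (List.replicate 1440 (0:Int), 0) from by norm_num,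
      hun]
  rw [hA]
  have hbuild := (pvBuildA _ hB01 0 []).1
  rw [show (⟨[], 0, 0, 0, false⟩ : PvStA) = ⟨[], List.length [], ((0/60 : Nat) : Int), ((0%60 : Nat) : Int), false⟩ from rfl,
    hbuild]
  -- B's side
  simp only [parse_schedule_py_alt, hflatlen, PySem.List.slice_from_one]
  have hs := pvStarts _ hB01 0 0
  have he := pvEnds _ hB01 0
  simp only [Nat.cast_zero, Nat.zero_add, reduceIte] at hs he
  rw [hs, he, hBlen, List.zip_map', List.map_map, List.nil_append]
  apply List.map_congr_left
  rintro ⟨s, e?⟩ hpr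
  cases e? with
  | none => simp [pvRender, pvClose, Function.comp]
  | some e =>
    have helt := pvPairs_snd_lt _ 0 none s e hpr
    rw [hBlen] at helt
    have hne : ((e : Nat) : Int) ≠ 1440 := by
      have : e < 1440 := by omega
      exact_mod_cast Nat.ne_of_lt this
    simp [pvRender, pvClose, Function.comp, hne]

-- ===== VERDICT (by name: the statement is the Claim_ definition above) =====
theorem parse_schedule_py_spec : Claim_equal_parse_schedule_py := by
  intro sched _ hpre
  unfold Spec_parse_schedule_py
  exact parse_schedule_py_main sched hpre
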